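-- pv_equiv track=rewrite | github.com/andrewschultz/stale-tales-slate | utils/towbal.py | word_poss
-- ===== SOURCE A (Python) =====
-- import math
-- from collections import defaultdict
--
-- def factor_of(y):
--     remaining = y
--     ary = []
--     while remaining % 2 == 0:
--         ary.append(2)
--         remaining >>= 1
--     seed = 3
--     while seed ** 2 <= remaining:
--         while remaining % seed == 0:
--             remaining //= seed
--             ary.append(seed)
--         seed += 2
--     if remaining > 1: ary.append(remaining)
--     return ary
--
-- def word_poss(x):
--     all = len(x)
--     vowels = 0
--     freq = defaultdict(int)
--     for y in x:
--         freq[y] += 1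
--     for v in 'aeiou':
--         vowels += x.lower().count(v)
--     ys = x.lower().count('y')
--     consonants = all - vowels - ys
--     temp = math.factorial(vowels) * math.factorial(consonants)
--     for q in freq:
--         temp //= math.factorial(freq[q])
--     return (factor_of(temp), temp)
-- ===== SOURCE B (Python) =====
-- import math
--
-- def least_factor(n):
--     if n % 2 == 0:
--         return 2
--     d = 3
--     while d * d <= n:
--         if n % d == 0:
--             return d
--         d += 2
--     return n
--
-- def prime_list(n):
--     out = []
--     while n > 1:
--         p = least_factor(n)
--         out.append(p)
--         n //= p
--     return out
--
-- def word_poss(x):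
--     lx = x.lower()
--     vowels = 0
--     for c in lx:
--         if c in 'aeiou':
--             vowels += 1
--     ys = lx.count('y')
--     consonants = len(x) - vowels - ys
--     counts = {}
--     for c in x:
--         counts[c] = counts.get(c, 0) + 1
--     den = 1
--     for n in counts.values():
--         den *= math.factorial(n)
--     temp = (math.factorial(vowels) * math.factorial(consonants)) // den
--     return (prime_list(temp), temp)
-- ===== Notes on version B (the rewrite author's own statement) =====
-- stated objective: alternative
-- what changed: B counts vowels in one pass instead of five count() scans, divides once by the product of the factorials instead of a chain of floor divisions, and factorizes by repeatedly extracting the least prime factor instead of A's resumable two-phase trial division; A's non-terminating factor_of(0) inputs (temp == 0, only reachable with many y's) are excluded by Pre_.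
-- outside the precondition, e.g. on word_poss('yy'): A does not finish within the time limit, B returns ([], 0)
import Mathlib
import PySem

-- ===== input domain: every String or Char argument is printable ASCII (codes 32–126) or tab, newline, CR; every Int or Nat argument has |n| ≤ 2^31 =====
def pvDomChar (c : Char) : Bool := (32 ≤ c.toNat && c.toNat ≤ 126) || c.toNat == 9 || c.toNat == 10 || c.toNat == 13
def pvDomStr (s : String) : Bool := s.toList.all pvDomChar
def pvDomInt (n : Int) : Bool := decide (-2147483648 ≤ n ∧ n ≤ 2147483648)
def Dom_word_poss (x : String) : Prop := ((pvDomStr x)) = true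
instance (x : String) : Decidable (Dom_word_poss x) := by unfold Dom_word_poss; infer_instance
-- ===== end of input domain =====

-- B changes the structure (one-pass vowel count, one division by the product of factorials,
-- least-prime-factor extraction instead of resumable trial division); equal values, no speed claim.

-- math.factorial (argument is always a nonnegative count here)
def pvFact (n : Int) : Int := (Nat.factorial n.toNat : Int)

-- floor division of nonnegatives, seen at the Nat level
theorem pvFloordivToNat (a b : Int) (ha : 0 ≤ a) (hb : 0 < b) :
    PySem.Int.floordiv a b = ((a.toNat / b.toNat : Nat) : Int) := by
  have h1 : ((a.toNat : Nat) : Int) = a := by omega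
  have h2 : ((b.toNat : Nat) : Int) = b := by omega
  conv_lhs => rw [← h1, ← h2]
  rw [PySem.Int.floordiv_natCast]

theorem pvSqLe (d n : Int) (hd : 0 ≤ d) (hn : 0 ≤ n) :
    d * d ≤ n ↔ d.toNat * d.toNat ≤ n.toNat := by
  have c1 : ((d.toNat : Nat) : Int) = d := by omega
  have c2 : ((n.toNat : Nat) : Int) = n := by omega
  constructor
  · intro h; zify; rw [c1, c2]; exact h
  · intro h
    have h2 := Int.ofNat_le.mpr h
    push_cast at h2
    rwa [c1, c2] at h2

theorem pvDvdIff (d n : Int) (hd : 0 ≤ d) (hn : 0 ≤ n) : d ∣ n ↔ d.toNat ∣ n.toNat := by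
  have c1 : ((d.toNat : Nat) : Int) = d := by omega
  have c2 : ((n.toNat : Nat) : Int) = n := by omega
  constructor
  · intro h; exact Int.natCast_dvd_natCast.mp (by rw [c1, c2]; exact h)
  · intro h; have := Int.natCast_dvd_natCast.mpr h; rwa [c1, c2] at this

-- the two facts every loop needs, with the quotient kept as one atom
theorem pvFloordivFacts (a b : Int) (ha : 0 < a) (hb : 1 < b) :
    0 ≤ PySem.Int.floordiv a b ∧ PySem.Int.floordiv a b < a := by
  rw [pvFloordivToNat a b (by omega) (by omega)]
  have h3 := Nat.div_lt_self (by omega : 0 < a.toNat) (by omega : 1 < b.toNat)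
  refine ⟨Int.natCast_nonneg _, ?_⟩
  calc ((a.toNat / b.toNat : Nat) : Int) < (a.toNat : Int) := by exact_mod_cast h3
    _ = a := by omega

-- named termination bounds (kept as lemmas so the ports' bodies stay small)
theorem pvDecHalf (r : Int) (h0 : 0 < r) : (PySem.Int.floordiv r 2).toNat < r.toNat := by
  obtain ⟨h1, h2⟩ := pvFloordivFacts r 2 h0 (by omega)
  omega

theorem pvDecDiv (s r : Int) (h2 : 2 ≤ s) (h0 : 0 < r) : (PySem.Int.floordiv r s).toNat < r.toNat := by
  obtain ⟨a, b⟩ := pvFloordivFacts r s h0 (by omega)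
  omega

theorem pvDecSq (d n : Int) (h : d * d ≤ n ∧ 3 ≤ d) (m : Int) (hm : 0 ≤ m) (hle : m ≤ n) :
    m.toNat + 1 - ((d + 2).toNat * (d + 2).toNat) < n.toNat + 1 - (d.toNat * d.toNat) := by
  have hd0 : (0:Int) < d := by omega
  have hn : (0:Int) < n := lt_of_lt_of_le (mul_pos hd0 hd0) h.1
  have c1 : ((d.toNat : Nat) : Int) = d := by omega
  have c2 : ((n.toNat : Nat) : Int) = n := by omega
  have e2 : d.toNat * d.toNat ≤ n.toNat := by zify; rw [c1, c2]; exact h.1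
  have e5 : (d + 2).toNat * (d + 2).toNat = d.toNat * d.toNat + 4 * d.toNat + 4 := by
    have e0 : (d + 2).toNat = d.toNat + 2 := by omega
    rw [e0]; ring
  have e4 : 3 ≤ d.toNat := by omega
  have e3 : m.toNat ≤ n.toNat := by omega
  rw [e5]
  generalize d.toNat * d.toNat = A at e2 ⊢
  omega

-- ===== PORT A =====
-- 'while remaining % 2 == 0: ary.append(2); remaining >>= 1' ('0 < remaining' is a totality
-- guard only: Python loops forever at remaining = 0, which Pre_ excludes)
def pvDivOut2 (remaining : Int) (ary : List Int) : List Int × Int :=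
  if h : PySem.Int.mod remaining 2 = 0 ∧ 0 < remaining then
    pvDivOut2 (PySem.Int.floordiv remaining 2) (ary ++ [2])
  else (ary, remaining)
termination_by remaining.toNat
decreasing_by exact pvDecHalf remaining h.2

-- 'while remaining % seed == 0: remaining //= seed; ary.append(seed)' (guards '2 ≤ seed ∧
-- 0 < remaining' are totality guards; they always hold at the call sites inside Pre_)
def pvInnerA (seed remaining : Int) (ary : List Int) : Int × List Int :=
  if h : PySem.Int.mod remaining seed = 0 ∧ 2 ≤ seed ∧ 0 < remaining then
    pvInnerA seed (PySem.Int.floordiv remaining seed) (ary ++ [seed])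
  else (remaining, ary)
termination_by remaining.toNat
decreasing_by exact pvDecDiv seed remaining h.2.1 h.2.2

theorem pvInnerA_fst_le (seed remaining : Int) (ary : List Int) (hr : 0 ≤ remaining) :
    (pvInnerA seed remaining ary).1 ≤ remaining ∧ 0 ≤ (pvInnerA seed remaining ary).1 := by
  fun_induction pvInnerA seed remaining ary with
  | case1 remaining ary h ih =>
      obtain ⟨h1, h2⟩ := pvFloordivFacts remaining seed (by omega) (by omega)
      obtain ⟨i1, i2⟩ := ih h1
      exact ⟨by omega, by omega⟩
  | case2 => exact ⟨le_refl _, hr⟩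

theorem pvDecOuter (seed remaining : Int) (ary : List Int) (h : seed * seed ≤ remaining ∧ 3 ≤ seed) :
    ((pvInnerA seed remaining ary).1).toNat + 1 - ((seed + 2).toNat * (seed + 2).toNat)
      < remaining.toNat + 1 - (seed.toNat * seed.toNat) := by
  have hr : (0:Int) < remaining := lt_of_lt_of_le (mul_pos (by omega) (by omega)) h.1
  obtain ⟨h1, h2⟩ := pvInnerA_fst_le seed remaining ary (le_of_lt hr)
  exact pvDecSq seed remaining h _ h2 h1

theorem pvDecSqSelf (d n : Int) (h : d * d ≤ n ∧ 3 ≤ d) :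
    n.toNat + 1 - ((d + 2).toNat * (d + 2).toNat) < n.toNat + 1 - (d.toNat * d.toNat) :=
  pvDecSq d n h n (le_of_lt (lt_of_lt_of_le (mul_pos (by omega) (by omega)) h.1)) (le_refl n)

-- 'while seed ** 2 <= remaining: … seed += 2' ('3 ≤ seed' is a totality guard, true at every call)
def pvOuterA (seed remaining : Int) (ary : List Int) : Int × List Int :=
  if h : seed * seed ≤ remaining ∧ 3 ≤ seed then
    let p := pvInnerA seed remaining ary
    pvOuterA (seed + 2) p.1 p.2
  else (remaining, ary)
termination_by (remaining.toNat + 1) - (seed.toNat * seed.toNat)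
decreasing_by exact pvDecOuter seed remaining ary h

def pvFactorOf (y : Int) : List Int :=
  let d := pvDivOut2 y []
  let o := pvOuterA 3 d.2 d.1
  if 1 < o.1 then o.2 ++ [o.1] else o.2

def word_poss (x : String) : List Int × Int :=
  let all : Int := (PySem.Str.len x : Int)
  let freq : PySem.Dict Char Int :=
    x.toList.foldl (fun d y => d.modify y 0 (· + 1)) PySem.Dict.empty
  let vowels : Int :=
    "aeiou".toList.foldl (fun acc v => acc + (PySem.Str.count (PySem.Str.lower x) (String.ofList [v]) : Int)) 0
  let ys : Int := (PySem.Str.count (PySem.Str.lower x) "y" : Int)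
  let consonants := all - vowels - ys
  let temp0 : Int := pvFact vowels * pvFact consonants
  let temp := freq.keys.foldl (fun t q => PySem.Int.floordiv t (pvFact (freq.getD q 0))) temp0
  (pvFactorOf temp, temp)

-- ===== PORT B =====
-- 'd = 3; while d*d <= n: if n % d == 0: return d; d += 2; return n' ('3 ≤ d' is a totality guard)
def pvLeastLoop (d n : Int) : Int :=
  if h : d * d ≤ n ∧ 3 ≤ d then
    if PySem.Int.mod n d = 0 then d else pvLeastLoop (d + 2) n
  else n
termination_by (n.toNat + 1) - (d.toNat * d.toNat)
decreasing_by exact pvDecSqSelf d n h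

def pvLeastFactor (n : Int) : Int :=
  if PySem.Int.mod n 2 = 0 then 2 else pvLeastLoop 3 n

theorem pvLeastLoop_eq_minFacAux (d n : Int) :
    3 ≤ d → 1 ≤ n → pvLeastLoop d n = ((n.toNat.minFacAux d.toNat : Nat) : Int) := by
  fun_induction pvLeastLoop d n with
  | case1 d h hdvd =>
      intro hd hn
      rw [Nat.minFacAux.eq_def]
      have hlt : ¬ n.toNat < d.toNat * d.toNat :=
        not_lt.mpr ((pvSqLe d n (by omega) (by omega)).mp h.1)
      have hdd : d.toNat ∣ n.toNat :=
        (pvDvdIff d n (by omega) (by omega)).mp ((PySem.Int.mod_eq_zero_iff_dvd n d).mp hdvd)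
      simp only [hlt, if_false, hdd, if_true, if_neg, if_pos]
      omega
  | case2 d h hdvd ih =>
      intro hd hn
      rw [Nat.minFacAux.eq_def]
      have hlt : ¬ n.toNat < d.toNat * d.toNat :=
        not_lt.mpr ((pvSqLe d n (by omega) (by omega)).mp h.1)
      have hdd : ¬ d.toNat ∣ n.toNat := by
        intro hc
        exact hdvd ((PySem.Int.mod_eq_zero_iff_dvd n d).mpr ((pvDvdIff d n (by omega) (by omega)).mpr hc))
      have e0 : (d + 2).toNat = d.toNat + 2 := by omega
      simp only [hlt, if_false, hdd, if_true, if_neg, if_pos]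
      rw [ih (by omega) hn, e0]
  | case3 d h =>
      intro hd3 hn
      rw [Nat.minFacAux.eq_def]
      have hlt : n.toNat < d.toNat * d.toNat := by
        by_contra hc
        exact h ⟨(pvSqLe d n (by omega) (by omega)).mpr (not_lt.mp hc), hd3⟩
      simp only [hlt, if_pos]
      omega

theorem pvLeastFactor_eq_minFac (n : Int) (hn : 2 ≤ n) :
    pvLeastFactor n = ((n.toNat.minFac : Nat) : Int) := by
  unfold pvLeastFactor Nat.minFac
  by_cases h2 : (2:Int) ∣ n
  · have hb : 2 ∣ n.toNat := (pvDvdIff 2 n (by omega) (by omega)).mp h2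
    rw [if_pos ((PySem.Int.mod_eq_zero_iff_dvd n 2).mpr h2), if_pos hb]
    rfl
  · have hb : ¬ 2 ∣ n.toNat := fun hc => h2 ((pvDvdIff 2 n (by omega) (by omega)).mpr hc)
    rw [if_neg (fun hc => h2 ((PySem.Int.mod_eq_zero_iff_dvd n 2).mp hc)), if_neg hb]
    have := pvLeastLoop_eq_minFacAux 3 n (by omega) (by omega)
    simpa using this

theorem pvLeastFactor_two_le (n : Int) (hn : 2 ≤ n) : 2 ≤ pvLeastFactor n := by
  rw [pvLeastFactor_eq_minFac n hn]
  have h1 : n.toNat ≠ 1 := by omega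
  have := (Nat.minFac_prime h1).two_le
  omega

-- 'out = []; while n > 1: p = least_factor(n); out.append(p); n //= p'
def pvPrimeList (n : Int) : List Int :=
  if h : 1 < n then
    pvLeastFactor n :: pvPrimeList (PySem.Int.floordiv n (pvLeastFactor n))
  else []
termination_by n.toNat
decreasing_by exact pvDecDiv (pvLeastFactor n) n (pvLeastFactor_two_le n (by omega)) (by omega)

def word_poss_alt (x : String) : List Int × Int :=
  let lx := PySem.Str.lower x
  let vowels : Int :=
    lx.toList.foldl (fun acc c => if c ∈ (['a','e','i','o','u'] : List Char) then acc + 1 else acc) 0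
  let ys : Int := (PySem.Str.count lx "y" : Int)
  let consonants := (PySem.Str.len x : Int) - vowels - ys
  let counts : PySem.Dict Char Int :=
    x.toList.foldl (fun d c => d.insert c (d.getD c 0 + 1)) PySem.Dict.empty
  let den : Int := counts.values.foldl (fun a n => a * pvFact n) 1
  let temp := PySem.Int.floordiv (pvFact vowels * pvFact consonants) den
  (pvPrimeList temp, temp)

-- ===== PRECONDITION & SPEC =====
def pvVowN (x : String) : Nat :=
  (PySem.Chars.lower x.toList).countP (fun c => decide (c ∈ (['a','e','i','o','u'] : List Char)))
def pvYsN (x : String) : Nat := (PySem.Chars.lower x.toList).count 'y'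
def pvDenN (x : String) : Nat :=
  ((PySem.List.dedup x.toList).map (fun c => Nat.factorial (x.toList.count c))).prod
-- Pre_ excludes exactly the inputs with temp = 0 (denominator exceeding the numerator, which needs
-- several 'y's): there Python A never returns — factor_of(0)'s first while-loop runs forever.
def Pre_word_poss (x : String) : Prop :=
  pvDenN x ≤ Nat.factorial (pvVowN x) * Nat.factorial (x.toList.length - pvVowN x - pvYsN x)
instance (x : String) : Decidable (Pre_word_poss x) := by unfold Pre_word_poss; infer_instance
def pvWitness_word_poss : String := "ab"

def Spec_word_poss (x : String) (out : List Int × Int) : Prop := out = word_poss_alt x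
instance (x : String) (out : List Int × Int) : Decidable (Spec_word_poss x out) := by unfold Spec_word_poss; infer_instance

-- ===== CLAIM (what is proved, stated in full; the proofs are below) =====
def Claim_equal_word_poss : Prop := ∀ (x : String), Dom_word_poss x → Pre_word_poss x → Spec_word_poss x (word_poss x)

-- ===== LEMMAS AND PROOFS =====

theorem pvFact_one_le (n : Int) : 1 ≤ pvFact n := by
  unfold pvFact
  exact_mod_cast Nat.one_le_iff_ne_zero.mpr (Nat.factorial_ne_zero _)

theorem pvFloordiv_nonneg (a b : Int) (ha : 0 ≤ a) (hb : 0 < b) : 0 ≤ PySem.Int.floordiv a b := by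
  rw [PySem.Int.floordiv_eq_ediv_of_pos hb]
  exact Int.ediv_nonneg ha (le_of_lt hb)

-- B side: pvPrimeList is the canonical prime factor list
theorem pvPrimeList_eq (n : Int) : 0 ≤ n →
    pvPrimeList n = (n.toNat.primeFactorsList).map (fun p => (p : Int)) := by
  fun_induction pvPrimeList n with
  | case1 n h ih =>
      intro hn
      have hlf := pvLeastFactor_eq_minFac n (by omega)
      have hmf2 : 2 ≤ n.toNat.minFac := (Nat.minFac_prime (by omega : n.toNat ≠ 1)).two_le
      obtain ⟨k, hk⟩ : ∃ k, n.toNat = k + 2 := ⟨n.toNat - 2, by omega⟩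
      have hq : (PySem.Int.floordiv n (pvLeastFactor n)).toNat = n.toNat / n.toNat.minFac := by
        rw [hlf, pvFloordivToNat n _ (by omega) (by exact_mod_cast Nat.lt_of_lt_of_le Nat.zero_lt_two hmf2)]
        simp only [Int.toNat_natCast]
      have hnn : 0 ≤ PySem.Int.floordiv n (pvLeastFactor n) := by
        apply pvFloordiv_nonneg _ _ (by omega)
        rw [hlf]; exact_mod_cast Nat.lt_of_lt_of_le Nat.zero_lt_two hmf2
      rw [ih hnn, hq, hlf]
      conv_rhs => rw [hk, Nat.primeFactorsList_add_two]
      simp [hk]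
  | case2 n h =>
      intro hn
      have : n.toNat = 0 ∨ n.toNat = 1 := by omega
      rcases this with h0 | h1
      · rw [h0]; simp [Nat.primeFactorsList_zero]
      · rw [h1]; simp [Nat.primeFactorsList_one]

-- A side: helper facts about Nat.primeFactorsList / minFac
theorem pvMinFacEq (n p : Nat) (hn : 2 ≤ n) (hp : p.Prime) (hdvd : p ∣ n)
    (hmin : ∀ q : Nat, q.Prime → q ∣ n → p ≤ q) : n.minFac = p := by
  apply le_antisymm (Nat.minFac_le_of_dvd hp.two_le hdvd)
  exact hmin _ (Nat.minFac_prime (by omega)) (Nat.minFac_dvd n)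

theorem pvPFLStep (n : Nat) (h : 2 ≤ n) :
    n.primeFactorsList = n.minFac :: (n / n.minFac).primeFactorsList := by
  obtain ⟨k, hk⟩ : ∃ k, n = k + 2 := ⟨n - 2, by omega⟩
  rw [hk, Nat.primeFactorsList_add_two]

-- pvDivOut2 invariant: strips the 2s, keeping the factor-list equation
theorem pvDivOut2_spec (remaining : Int) (ary : List Int) : 1 ≤ remaining →
    1 ≤ (pvDivOut2 remaining ary).2 ∧ ¬ (2 ∣ ((pvDivOut2 remaining ary).2.toNat)) ∧
      (pvDivOut2 remaining ary).1 ++ ((pvDivOut2 remaining ary).2.toNat.primeFactorsList).map (fun p => (p : Int))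
        = ary ++ (remaining.toNat.primeFactorsList).map (fun p => (p : Int)) := by
  fun_induction pvDivOut2 remaining ary with
  | case1 remaining ary h ih =>
      intro hr
      have hdvd : (2:Int) ∣ remaining := (PySem.Int.mod_eq_zero_iff_dvd remaining 2).mp h.1
      have hdn : 2 ∣ remaining.toNat := (pvDvdIff 2 remaining (by omega) (by omega)).mp hdvd
      have hr2 : 2 ≤ remaining := by
        rcases hdvd with ⟨c, hc⟩; omega
      have hq : (PySem.Int.floordiv remaining 2).toNat = remaining.toNat / 2 := by
        rw [pvFloordivToNat remaining 2 (by omega) (by omega)]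
        rw [show (2:Int).toNat = 2 from rfl]
        simp only [Int.toNat_natCast]
      have hq1 : 1 ≤ PySem.Int.floordiv remaining 2 := by
        rw [pvFloordivToNat remaining 2 (by omega) (by omega)]
        have : 1 ≤ remaining.toNat / 2 := (Nat.one_le_div_iff (by omega)).mpr (by omega)
        exact_mod_cast this
      obtain ⟨i1, i2, i3⟩ := ih hq1
      refine ⟨i1, i2, ?_⟩
      rw [i3, hq]
      have hmf : remaining.toNat.minFac = 2 := by
        unfold Nat.minFac; rw [if_pos hdn]
      rw [pvPFLStep remaining.toNat (by omega), hmf]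
      simp
  | case2 remaining ary h =>
      intro hr
      have hnd : ¬ (2 ∣ remaining.toNat) := by
        intro hc
        have : (2:Int) ∣ remaining := (pvDvdIff 2 remaining (by omega) (by omega)).mpr hc
        exact h ⟨(PySem.Int.mod_eq_zero_iff_dvd remaining 2).mpr this, by omega⟩
      exact ⟨hr, hnd, rfl⟩

-- pvInnerA invariant: strips the factors seed, keeping the factor-list equation
theorem pvInnerA_spec (seed remaining : Int) (ary : List Int) : 3 ≤ seed → 1 ≤ remaining →
    (∀ q : Nat, q.Prime → q ∣ remaining.toNat → seed.toNat ≤ q) →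
    1 ≤ (pvInnerA seed remaining ary).1 ∧ ¬ (seed ∣ (pvInnerA seed remaining ary).1) ∧
      (∀ q : Nat, q.Prime → q ∣ ((pvInnerA seed remaining ary).1).toNat → seed.toNat ≤ q) ∧
      (pvInnerA seed remaining ary).1 ∣ remaining ∧
      (pvInnerA seed remaining ary).2 ++ (((pvInnerA seed remaining ary).1).toNat.primeFactorsList).map (fun p => (p : Int))
        = ary ++ (remaining.toNat.primeFactorsList).map (fun p => (p : Int)) := by
  fun_induction pvInnerA seed remaining ary with
  | case1 remaining ary h ih =>
      intro hs hr hmin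
      have hdvd : seed ∣ remaining := (PySem.Int.mod_eq_zero_iff_dvd remaining seed).mp h.1
      have hdn : seed.toNat ∣ remaining.toNat := (pvDvdIff seed remaining (by omega) (by omega)).mp hdvd
      -- seed is prime: its least prime factor divides remaining, hence is ≥ seed, hence = seed
      have hs2 : 2 ≤ seed.toNat := by omega
      have hsp : Nat.Prime seed.toNat := by
        have h1 := Nat.minFac_prime (by omega : seed.toNat ≠ 1)
        have h2 : seed.toNat.minFac ∣ remaining.toNat := (Nat.minFac_dvd seed.toNat).trans hdn
        have h3 := hmin _ h1 h2
        have h4 := Nat.minFac_le (by omega : 0 < seed.toNat)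
        have : seed.toNat.minFac = seed.toNat := by omega
        rwa [this] at h1
      have hmf : remaining.toNat.minFac = seed.toNat := pvMinFacEq _ _
        (by have := Nat.le_of_dvd (by omega) hdn; omega) hsp hdn hmin
      have hq : (PySem.Int.floordiv remaining seed).toNat = remaining.toNat / seed.toNat := by
        rw [pvFloordivToNat remaining seed (by omega) (by omega)]
        simp only [Int.toNat_natCast]
      have hq1 : 1 ≤ PySem.Int.floordiv remaining seed := by
        rw [pvFloordivToNat remaining seed (by omega) (by omega)]
        have h5 := Nat.le_of_dvd (by omega) hdn
        have : 1 ≤ remaining.toNat / seed.toNat := (Nat.one_le_div_iff (by omega)).mpr h5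
        exact_mod_cast this
      have hmin' : ∀ q : Nat, q.Prime → q ∣ (PySem.Int.floordiv remaining seed).toNat → seed.toNat ≤ q := by
        intro q hqp hqd
        rw [hq] at hqd
        exact hmin q hqp (hqd.trans (Nat.div_dvd_of_dvd hdn))
      obtain ⟨i1, i2, i3, i4, i5⟩ := ih hs hq1 hmin'
      have hfd : PySem.Int.floordiv remaining seed ∣ remaining := by
        rw [pvFloordivToNat remaining seed (by omega) (by omega)]
        have hnd : remaining.toNat / seed.toNat ∣ remaining.toNat := Nat.div_dvd_of_dvd hdn
        have := Int.natCast_dvd_natCast.mpr hnd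
        have c2 : ((remaining.toNat : Nat) : Int) = remaining := by omega
        rwa [c2] at this
      refine ⟨i1, i2, i3, i4.trans hfd, ?_⟩
      rw [i5]
      rw [pvPFLStep remaining.toNat (by have := Nat.le_of_dvd (by omega) hdn; omega), hmf, hq]
      simp
      omega
  | case2 remaining ary h =>
      intro hs hr hmin
      have hnd : ¬ (seed ∣ remaining) := by
        intro hc
        exact h ⟨(PySem.Int.mod_eq_zero_iff_dvd remaining seed).mpr hc, by omega, by omega⟩
      exact ⟨hr, hnd, hmin, dvd_refl _, rfl⟩

-- pvOuterA: finishes the factorization of an odd remainder whose prime factors are all ≥ seed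
theorem pvOuterA_spec (seed remaining : Int) (ary : List Int) : 3 ≤ seed → seed.toNat % 2 = 1 →
    1 ≤ remaining → ¬ (2 ∣ remaining.toNat) →
    (∀ q : Nat, q.Prime → q ∣ remaining.toNat → seed.toNat ≤ q) →
    (if 1 < (pvOuterA seed remaining ary).1 then (pvOuterA seed remaining ary).2 ++ [(pvOuterA seed remaining ary).1]
       else (pvOuterA seed remaining ary).2)
      = ary ++ (remaining.toNat.primeFactorsList).map (fun p => (p : Int)) := by
  fun_induction pvOuterA seed remaining ary with
  | case1 seed remaining ary h p ih =>
      intro hs hodd hr hno2 hmin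
      obtain ⟨i1, i2, i3, i4, i5⟩ := pvInnerA_spec seed remaining ary hs hr hmin
      have hdvdN : ((pvInnerA seed remaining ary).1).toNat ∣ remaining.toNat :=
        (pvDvdIff _ _ (by omega) (by omega)).mp i4
      have hno2' : ¬ (2 ∣ ((pvInnerA seed remaining ary).1).toNat) :=
        fun hc => hno2 (hc.trans hdvdN)
      have hmin' : ∀ q : Nat, q.Prime → q ∣ ((pvInnerA seed remaining ary).1).toNat → (seed + 2).toNat ≤ q := by
        intro q hqp hqd
        have hge := i3 q hqp hqd
        have hqs : q ≠ seed.toNat := by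
          intro hc
          apply i2
          have : (q : Int) ∣ ((pvInnerA seed remaining ary).1) := by
            have := Int.natCast_dvd_natCast.mpr hqd
            have c2 : ((((pvInnerA seed remaining ary).1).toNat : Nat) : Int) = (pvInnerA seed remaining ary).1 := by omega
            rwa [c2] at this
          rw [hc] at this
          have c1 : ((seed.toNat : Nat) : Int) = seed := by omega
          rwa [c1] at this
        have hqodd : q % 2 = 1 := by
          rcases Nat.mod_two_eq_zero_or_one q with h0 | h1
          · exfalso; exact hno2' (dvd_trans (Nat.dvd_of_mod_eq_zero h0) hqd)
          · exact h1
        omega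
      rw [ih (by omega) (by omega) i1 hno2' hmin']
      rw [i5]
  | case2 seed remaining ary h =>
      intro hs hodd hr hno2 hmin
      have hnsq : ¬ (seed * seed ≤ remaining) := fun hc => h ⟨hc, hs⟩
      by_cases h1 : remaining = 1
      · rw [h1]
        norm_num [Nat.primeFactorsList_one]
      · have hr2 : 2 ≤ remaining := by omega
        have hprime : remaining.toNat.Prime := by
          by_contra hnp
          have hsq := Nat.minFac_sq_le_self (by omega : 0 < remaining.toNat) hnp
          have hge := hmin _ (Nat.minFac_prime (by omega : remaining.toNat ≠ 1)) (Nat.minFac_dvd _)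
          have : seed.toNat * seed.toNat ≤ remaining.toNat := by nlinarith
          exact hnsq ((pvSqLe seed remaining (by omega) (by omega)).mpr this)
        rw [if_pos (by omega : 1 < remaining), Nat.primeFactorsList_prime hprime]
        simp
        omega

-- A's factor_of equals the canonical prime factor list
theorem pvFactorOf_eq (t : Int) (ht : 1 ≤ t) :
    pvFactorOf t = (t.toNat.primeFactorsList).map (fun p => (p : Int)) := by
  unfold pvFactorOf
  obtain ⟨d1, d2, d3⟩ := pvDivOut2_spec t [] ht
  have hmin : ∀ q : Nat, q.Prime → q ∣ ((pvDivOut2 t []).2).toNat → (3:Int).toNat ≤ q := by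
    intro q hqp hqd
    have h2 := hqp.two_le
    rcases Nat.lt_or_ge q 3 with hlt | hge
    · exfalso
      have : q = 2 := by omega
      rw [this] at hqd
      exact d2 hqd
    · exact hge
  have := pvOuterA_spec 3 (pvDivOut2 t []).2 (pvDivOut2 t []).1 (by omega) (by decide) d1 d2 hmin
  rw [this, d3]
  simp

-- A's factor list equals B's
theorem pvFactor_eq_primeList (t : Int) (ht : 1 ≤ t) : pvFactorOf t = pvPrimeList t := by
  rw [pvFactorOf_eq t ht, pvPrimeList_eq t (by omega)]

-- single-character str.count is List.count
theorem pvCountGoSingleton (c : Char) (l : List Char) : ∀ (fuel acc : Nat), l.length ≤ fuel →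
    PySem.Chars.count.go [c] fuel l acc = acc + l.count c := by
  induction l with
  | nil => intro fuel acc _; cases fuel <;> simp [PySem.Chars.count.go]
  | cons h t ih =>
      intro fuel acc hf
      cases fuel with
      | zero => simp at hf
      | succ f =>
          simp only [List.length_cons] at hf
          simp only [PySem.Chars.count.go, List.isPrefixOf, List.count_cons]
          by_cases hc : c = h
          · rw [if_pos (by simp [hc])]
            rw [List.length_singleton, List.drop_one, List.tail_cons, ih f (acc + 1) (by omega)]
            have : (h == c) = true := by simp [hc]
            simp [this]
            omega
          · rw [if_neg (by simp [hc])]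
            rw [ih f acc (by omega)]
            have : (h == c) = false := by simp; exact fun e => hc e.symm
            simp [this]

theorem pvCountSingleton (l : List Char) (c : Char) : PySem.Chars.count l [c] = l.count c := by
  unfold PySem.Chars.count
  rw [if_neg (by simp)]
  rw [pvCountGoSingleton c l l.length 0 (le_refl _)]
  omega

theorem pvVowelsSum (l : List Char) :
    ((['a','e','i','o','u'] : List Char).map (fun v => (l.count v : Int))).sum
      = ((l.countP (fun c => decide (c ∈ (['a','e','i','o','u'] : List Char))) : Nat) : Int) := by
  induction l with
  | nil => decide
  | cons c l ih =>
      simp only [List.map_cons, List.map_nil, List.sum_cons, List.sum_nil, List.count_cons,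
        List.countP_cons] at ih ⊢
      by_cases hc : c ∈ (['a','e','i','o','u'] : List Char)
      · have hv' : decide (c ∈ (['a','e','i','o','u'] : List Char)) = true := by simp [hc]
        rw [hv']
        fin_cases hc <;> norm_num at ih ⊢ <;> push_cast <;> omega
      · have hv' : decide (c ∈ (['a','e','i','o','u'] : List Char)) = false := by simp [hc]
        rw [hv']
        have h1 : (c == 'a') = false := by simp; intro h; exact hc (by simp [h])
        have h2 : (c == 'e') = false := by simp; intro h; exact hc (by simp [h])
        have h3 : (c == 'i') = false := by simp; intro h; exact hc (by simp [h])
        have h4 : (c == 'o') = false := by simp; intro h; exact hc (by simp [h])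
        have h5 : (c == 'u') = false := by simp; intro h; exact hc (by simp [h])
        rw [h1, h2, h3, h4, h5]
        norm_num at ih ⊢
        push_cast
        omega

theorem pvVowYsLe (l : List Char) :
    l.countP (fun c => decide (c ∈ (['a','e','i','o','u'] : List Char))) + l.count 'y' ≤ l.length := by
  induction l with
  | nil => simp
  | cons c l ih =>
      simp only [List.countP_cons, List.count_cons, List.length_cons]
      by_cases hc : c = 'y'
      · have hv : decide (c ∈ (['a','e','i','o','u'] : List Char)) = false := by subst hc; decide
        have hy : (c == 'y') = true := by simp [hc]
        rw [hv, hy]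
        norm_num at ih ⊢
        omega
      · have hy : (c == 'y') = false := by simp [hc]
        by_cases hv : c ∈ (['a','e','i','o','u'] : List Char)
        · have hv' : decide (c ∈ (['a','e','i','o','u'] : List Char)) = true := by simp [hv]
          rw [hv', hy]
          norm_num at ih ⊢
          omega
        · have hv' : decide (c ∈ (['a','e','i','o','u'] : List Char)) = false := by simp [hv]
          rw [hv', hy]
          norm_num at ih ⊢
          omega

theorem pvFoldlMulInit (f : Char → Int) (ks : List Char) : ∀ (a b : Int),
    ks.foldl (fun x q => x * f q) (a * b) = a * ks.foldl (fun x q => x * f q) b := by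
  induction ks with
  | nil => intro a b; simp
  | cons k ks ih =>
      intro a b
      simp only [List.foldl_cons]
      rw [mul_assoc, ih]


theorem pvFoldlMulOneLe (f : Char → Int) (ks : List Char) :
    1 ≤ ks.foldl (fun a q => a * pvFact (f q)) 1 := by
  induction ks with
  | nil => simp
  | cons k ks ih =>
      simp only [List.foldl_cons, one_mul]
      have h1 := pvFact_one_le (f k)
      calc (1:Int) ≤ ks.foldl (fun a q => a * pvFact (f q)) 1 := ih
        _ ≤ pvFact (f k) * ks.foldl (fun a q => a * pvFact (f q)) 1 :=
            le_mul_of_one_le_left (by omega) h1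
        _ = ks.foldl (fun a q => a * pvFact (f q)) (pvFact (f k) * 1) := (pvFoldlMulInit _ ks _ 1).symm
        _ = ks.foldl (fun a q => a * pvFact (f q)) (pvFact (f k)) := by rw [mul_one]


theorem pvFloordivChain (f : Char → Int) (ks : List Char) : ∀ (N : Int), 0 ≤ N →
    ks.foldl (fun t q => PySem.Int.floordiv t (pvFact (f q))) N
      = PySem.Int.floordiv N (ks.foldl (fun a q => a * pvFact (f q)) 1) := by
  induction ks with
  | nil =>
      intro N hN
      simp only [List.foldl_nil]
      rw [PySem.Int.floordiv_eq_ediv_of_pos (by omega), Int.ediv_one]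
  | cons k ks ih =>
      intro N hN
      simp only [List.foldl_cons, one_mul]
      have hf := pvFact_one_le (f k)
      have hrest := pvFoldlMulOneLe f ks
      rw [ih _ (pvFloordiv_nonneg N _ hN (by omega))]
      have e1 : ks.foldl (fun a q => a * pvFact (f q)) (pvFact (f k))
          = pvFact (f k) * ks.foldl (fun a q => a * pvFact (f q)) 1 := by
        rw [← pvFoldlMulInit (fun q => pvFact (f q)) ks (pvFact (f k)) 1, mul_one]
      rw [e1]
      rw [PySem.Int.floordiv_eq_ediv_of_pos (by omega), PySem.Int.floordiv_eq_ediv_of_pos (by nlinarith),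
        PySem.Int.floordiv_eq_ediv_of_pos (by nlinarith)]
      exact Int.ediv_ediv_eq_ediv_mul (by omega)

-- casts
theorem pvFact_natCast (k : Nat) : pvFact ((k : Nat) : Int) = ((Nat.factorial k : Nat) : Int) := by
  unfold pvFact
  simp

theorem pvProdCast (g : Char → Nat) (ks : List Char) :
    ks.foldl (fun a q => a * ((g q : Nat) : Int)) 1 = (((ks.map g).prod : Nat) : Int) := by
  induction ks with
  | nil => simp
  | cons k ks ih =>
      simp only [List.foldl_cons, one_mul, List.map_cons, List.prod_cons]
      rw [show ((g k : Nat) : Int) = ((g k : Nat) : Int) * 1 from (mul_one _).symm, pvFoldlMulInit]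
      rw [ih]
      push_cast
      ring

theorem pvDenN_pos (x : String) : 0 < pvDenN x := by
  unfold pvDenN
  apply List.prod_pos
  intro a ha
  simp only [List.mem_map] at ha
  obtain ⟨c, _, hc⟩ := ha
  rw [← hc]
  exact Nat.factorial_pos _

-- the two ports compute the same quotient temp
theorem pvTemp_eq (x : String) (N : Int) (hN : 0 ≤ N) :
    ((x.toList.foldl (fun d y => d.modify y 0 (· + 1)) PySem.Dict.empty : PySem.Dict Char Int)).keys.foldl
        (fun t q => PySem.Int.floordiv t
          (pvFact (((x.toList.foldl (fun d y => d.modify y 0 (· + 1)) PySem.Dict.empty : PySem.Dict Char Int)).getD q 0))) N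
    = PySem.Int.floordiv N (((pvDenN x : Nat) : Int)) := by
  rw [← PySem.Dict.counter_eq_foldl]
  simp only [PySem.Dict.keys_counter, PySem.Dict.getD_counter]
  rw [pvFloordivChain (fun q => ((List.count q x.toList : Nat) : Int)) (PySem.Set.ofList x.toList) _ hN]
  congr 1
  have e1 : ∀ q : Char, pvFact ((List.count q x.toList : Nat) : Int)
      = ((Nat.factorial (List.count q x.toList) : Nat) : Int) := fun q => pvFact_natCast _
  calc (PySem.Set.ofList x.toList).foldl
        (fun a q => a * pvFact ((List.count q x.toList : Nat) : Int)) 1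
      = (PySem.Set.ofList x.toList).foldl
        (fun a q => a * ((Nat.factorial (List.count q x.toList) : Nat) : Int)) 1 := by
        simp only [e1]
    _ = ((((PySem.Set.ofList x.toList).map (fun c => Nat.factorial (List.count c x.toList))).prod : Nat) : Int) :=
        pvProdCast _ _
    _ = ((pvDenN x : Nat) : Int) := by rw [pvDenN, PySem.List.dedup_eq_ofList]

-- B's denominator is the product of the factorials of the multiplicities
theorem pvDen_eq (x : String) :
    (x.toList.foldl (fun d c => d.insert c (d.getD c 0 + 1)) PySem.Dict.empty).values.foldl
        (fun a n => a * pvFact n) 1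
      = ((pvDenN x : Nat) : Int) := by
  rw [PySem.Dict.foldl_insert_getD_add_one_eq_counter]
  have hv : (PySem.Dict.counter x.toList).values
      = (PySem.Set.ofList x.toList).map (fun k => ((List.count k x.toList : Nat) : Int)) := by
    show (PySem.Dict.counter x.toList).items.map (·.2) = _
    rw [PySem.Dict.items_counter]
    simp [List.map_map, Function.comp]
  rw [hv, List.foldl_map]
  have e1 : ∀ q : Char, pvFact ((List.count q x.toList : Nat) : Int)
      = ((Nat.factorial (List.count q x.toList) : Nat) : Int) := fun q => pvFact_natCast _
  calc (PySem.Set.ofList x.toList).foldl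
        (fun a q => a * pvFact ((List.count q x.toList : Nat) : Int)) 1
      = (PySem.Set.ofList x.toList).foldl
        (fun a q => a * ((Nat.factorial (List.count q x.toList) : Nat) : Int)) 1 := by
        simp only [e1]
    _ = ((((PySem.Set.ofList x.toList).map (fun c => Nat.factorial (List.count c x.toList))).prod : Nat) : Int) :=
        pvProdCast _ _
    _ = ((pvDenN x : Nat) : Int) := by rw [pvDenN, PySem.List.dedup_eq_ofList]

-- A's five count() passes equal B's single countP pass
theorem pvVow_eq (x : String) :
    "aeiou".toList.foldl
        (fun acc v => acc + ((PySem.Str.count (PySem.Str.lower x) (String.ofList [v]) : Nat) : Int)) 0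
      = ((pvVowN x : Nat) : Int) := by
  have hs : "aeiou".toList = (['a','e','i','o','u'] : List Char) := by decide
  simp only [hs, PySem.Str.count_eq, String.toList_ofList, pvCountSingleton, PySem.Str.toList_lower]
  rw [PySem.List.foldl_add (['a','e','i','o','u'] : List Char)
    (fun v => ((List.count v (PySem.Chars.lower x.toList) : Nat) : Int)) 0]
  rw [pvVowelsSum (PySem.Chars.lower x.toList)]
  unfold pvVowN
  omega

theorem pvYs_eq (x : String) :
    ((PySem.Str.count (PySem.Str.lower x) "y" : Nat) : Int) = ((pvYsN x : Nat) : Int) := by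
  have hy : ("y" : String).toList = ['y'] := by decide
  rw [PySem.Str.count_eq, hy, PySem.Str.toList_lower, pvCountSingleton]
  rfl

theorem pvCons_eq (x : String) :
    (PySem.Str.len x) - ((pvVowN x : Nat) : Int) - ((pvYsN x : Nat) : Int)
      = ((x.toList.length - pvVowN x - pvYsN x : Nat) : Int) := by
  have hlen : (PySem.Chars.lower x.toList).length = x.toList.length := by
    unfold PySem.Chars.lower
    exact List.length_map ..
  have hle := pvVowYsLe (PySem.Chars.lower x.toList)
  rw [hlen] at hle
  rw [PySem.Str.len_eq]
  unfold pvVowN pvYsN at *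
  omega

-- ===== VERDICT (by name: the statement is the Claim_ definition above) =====
theorem word_poss_spec : Claim_equal_word_poss := by
  intro x hdom hpre
  unfold Spec_word_poss word_poss word_poss_alt
  simp only [PySem.List.foldl_ite_add_one (fun c => c ∈ (['a','e','i','o','u'] : List Char))]
  rw [pvVow_eq x, pvYs_eq x, pvCons_eq x]
  simp only [zero_add, PySem.Str.toList_lower]
  have hbv : List.countP (fun c => decide (c ∈ (['a','e','i','o','u'] : List Char)))
      (PySem.Chars.lower x.toList) = pvVowN x := rfl
  rw [hbv, pvCons_eq x]
  have hN : 0 ≤ pvFact (((pvVowN x : Nat) : Int)) * pvFact (((x.toList.length - pvVowN x - pvYsN x : Nat) : Int)) := by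
    have h1 := pvFact_one_le (((pvVowN x : Nat) : Int))
    have h2 := pvFact_one_le (((x.toList.length - pvVowN x - pvYsN x : Nat) : Int))
    nlinarith
  rw [pvTemp_eq x _ hN]
  rw [pvDen_eq x]
  have hcast : pvFact (((pvVowN x : Nat) : Int)) * pvFact (((x.toList.length - pvVowN x - pvYsN x : Nat) : Int))
      = (((Nat.factorial (pvVowN x) * Nat.factorial (x.toList.length - pvVowN x - pvYsN x) : Nat) : Int)) := by
    rw [pvFact_natCast, pvFact_natCast]
    push_cast
    ring
  have hT : PySem.Int.floordiv
      (pvFact (((pvVowN x : Nat) : Int)) * pvFact (((x.toList.length - pvVowN x - pvYsN x : Nat) : Int)))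
      (((pvDenN x : Nat) : Int))
      = (((Nat.factorial (pvVowN x) * Nat.factorial (x.toList.length - pvVowN x - pvYsN x)) / pvDenN x : Nat) : Int) := by
    rw [hcast, PySem.Int.floordiv_natCast]
  have hT1 : 1 ≤ PySem.Int.floordiv
      (pvFact (((pvVowN x : Nat) : Int)) * pvFact (((x.toList.length - pvVowN x - pvYsN x : Nat) : Int)))
      (((pvDenN x : Nat) : Int)) := by
    rw [hT]
    have := (Nat.one_le_div_iff (pvDenN_pos x)).mpr hpre
    exact_mod_cast this
  rw [pvFactor_eq_primeList _ hT1]
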